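-- pv_equiv track=rewrite | github.com/Omarmeks89/rates_parser | src/services/drivers.py | _have_all_required_headers
-- ===== SOURCE A (Python) =====
-- import typing
--
-- def _have_all_required_headers(
--
--         required: typing.List[str],
--         fetched: typing.List[str]
--         ) -> bool:
--     matched = []
--     for idx, i in enumerate(required):
--         try:
--             matched.append(fetched[idx] == i)
--         except IndexError:
--             matched.append(False)
--     return True if all(matched) else False
-- ===== SOURCE B (Python) =====
-- import typing
--
-- def _have_all_required_headers(
--         required: typing.List[str],
--         fetched: typing.List[str]
--         ) -> bool:
--     return fetched[:len(required)] == required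
-- ===== Notes on version B (the rewrite author's own statement) =====
-- stated objective: simpler
-- what changed: Replaces the index loop with try/except IndexError, the accumulated boolean list and the all()/ternary with a single slice-prefix equality `fetched[:len(required)] == required`.
import Mathlib
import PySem

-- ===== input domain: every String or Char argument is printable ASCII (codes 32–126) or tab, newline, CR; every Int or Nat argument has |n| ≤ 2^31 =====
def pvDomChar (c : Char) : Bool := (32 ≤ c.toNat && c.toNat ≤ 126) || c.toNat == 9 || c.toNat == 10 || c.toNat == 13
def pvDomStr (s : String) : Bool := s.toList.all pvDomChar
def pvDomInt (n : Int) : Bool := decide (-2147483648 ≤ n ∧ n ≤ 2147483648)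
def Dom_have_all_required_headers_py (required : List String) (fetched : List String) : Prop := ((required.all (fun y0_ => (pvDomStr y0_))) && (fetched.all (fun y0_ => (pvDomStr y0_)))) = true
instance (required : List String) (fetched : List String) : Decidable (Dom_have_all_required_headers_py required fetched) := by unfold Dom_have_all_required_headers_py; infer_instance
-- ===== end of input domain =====

-- B replaces A's index loop with try/except and boolean-list accumulation by one slice-prefix equality (simpler; same cost).

-- ===== PORT A =====
-- the for-loop over enumerate(required): idx is the running index, each step appends
-- (fetched[idx] == i) or False on IndexError (pyGet? = none)
def pvALoop (fetched : List String) (idx : Int) : List String → List Bool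
  | [] => []
  | i :: rest =>
      (match PySem.List.pyGet? fetched idx with
       | some v => v == i
       | none => false) :: pvALoop fetched (idx + 1) rest

def have_all_required_headers_py (required : List String) (fetched : List String) : Bool :=
  let matched := pvALoop fetched 0 required
  if matched.all id then true else false

-- ===== PORT B =====
def have_all_required_headers_py_alt (required : List String) (fetched : List String) : Bool :=
  PySem.List.slice fetched none (some (required.length : Int)) == required

-- ===== PRECONDITION & SPEC =====
def Spec_have_all_required_headers_py (required : List String) (fetched : List String) (out : Bool) : Prop := out = have_all_required_headers_py_alt required fetched
instance (required : List String) (fetched : List String) (out : Bool) : Decidable (Spec_have_all_required_headers_py required fetched out) := by unfold Spec_have_all_required_headers_py; infer_instance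

-- ===== CLAIM (what is proved, stated in full; the proofs are below) =====
def Claim_equal_have_all_required_headers_py : Prop := ∀ (required : List String) (fetched : List String), Dom_have_all_required_headers_py required fetched → Spec_have_all_required_headers_py required fetched (have_all_required_headers_py required fetched)

-- ===== LEMMAS AND PROOFS =====
theorem pvALoop_all (required : List String) (fetched : List String) :
    ∀ n : Nat, (pvALoop fetched (n : Int) required).all id
      = decide ((fetched.drop n).take required.length = required) := by
  induction required with
  | nil => intro n; simp [pvALoop]
  | cons i rest ih =>
    intro n
    have hstep : ((n : Int) + 1) = ((n + 1 : Nat) : Int) := by push_cast; ring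
    cases hd : fetched.drop n with
    | nil =>
      have hlen : fetched.length ≤ n := by
        have := congrArg List.length hd; simp at this; omega
      have hget : fetched[n]? = none := by
        simp [hlen]
      simp [pvALoop, PySem.List.pyGet?_natCast, hget]
    | cons x xs =>
      have hget : fetched[n]? = some x := by
        have : (fetched.drop n).head? = fetched[n]? := List.head?_drop
        rw [hd] at this; simpa using this.symm
      have hdrop : fetched.drop (n + 1) = xs := by
        rw [← List.tail_drop, hd]; rfl
      rw [pvALoop]
      simp only [List.all_cons, hstep, ih (n + 1), hdrop]
      simp [PySem.List.pyGet?_natCast, hget]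
      by_cases hx : x = i <;> simp [hx]

-- ===== VERDICT (by name: the statement is the Claim_ definition above) =====
theorem have_all_required_headers_py_spec : Claim_equal_have_all_required_headers_py := by
  intro required fetched _
  unfold Spec_have_all_required_headers_py have_all_required_headers_py have_all_required_headers_py_alt
  have h := pvALoop_all required fetched 0
  simp only [Nat.cast_zero] at h
  rw [PySem.List.slice_to_natCast]
  simp only [h, List.drop_zero]
  by_cases he : List.take required.length fetched = required <;> simp [he]
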